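-- pv_equiv track=rewrite | github.com/PaddlePaddle/PaddleVideo | docs/src/paddlevideo/metrics/segmentation_metric.py | get_labels_start_end_time
-- ===== SOURCE A (Python) =====
-- def get_labels_start_end_time(frame_wise_labels,
--                               bg_class=["background", "None"]):
--     labels = []
--     starts = []
--     ends = []
--     last_label = frame_wise_labels[0]
--     if frame_wise_labels[0] not in bg_class:
--         labels.append(frame_wise_labels[0])
--         starts.append(0)
--     for i in range(len(frame_wise_labels)):
--         if frame_wise_labels[i] != last_label:
--             if frame_wise_labels[i] not in bg_class:
--                 labels.append(frame_wise_labels[i])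
--                 starts.append(i)
--             if last_label not in bg_class:
--                 ends.append(i)
--             last_label = frame_wise_labels[i]
--     if last_label not in bg_class:
--         ends.append(i + 1)
--     return labels, starts, ends
-- ===== SOURCE B (Python) =====
-- def get_labels_start_end_time(frame_wise_labels,
--                               bg_class=["background", "None"]):
--     n = len(frame_wise_labels)
--     # boundary indices: 0 and every position whose label differs from its left
--     # neighbour, plus the sentinel n; consecutive boundaries delimit the runs
--     bounds = [i for i in range(n)
--               if i == 0 or frame_wise_labels[i] != frame_wise_labels[i - 1]] + [n]
--     segs = [(frame_wise_labels[s], s, e)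
--             for s, e in zip(bounds, bounds[1:])
--             if frame_wise_labels[s] not in bg_class]
--     return [l for l, _, _ in segs], [s for _, s, _ in segs], [e for _, _, e in segs]
-- ===== Notes on version B (the rewrite author's own statement) =====
-- stated objective: alternative
-- what changed: B replaces A's stateful last_label loop with interleaved appends to three lists by a stateless boundary-index computation: a comprehension collects every index whose label differs from its left neighbour, zip of consecutive boundaries yields the segments, and background segments are filtered out.
import Mathlib
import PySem

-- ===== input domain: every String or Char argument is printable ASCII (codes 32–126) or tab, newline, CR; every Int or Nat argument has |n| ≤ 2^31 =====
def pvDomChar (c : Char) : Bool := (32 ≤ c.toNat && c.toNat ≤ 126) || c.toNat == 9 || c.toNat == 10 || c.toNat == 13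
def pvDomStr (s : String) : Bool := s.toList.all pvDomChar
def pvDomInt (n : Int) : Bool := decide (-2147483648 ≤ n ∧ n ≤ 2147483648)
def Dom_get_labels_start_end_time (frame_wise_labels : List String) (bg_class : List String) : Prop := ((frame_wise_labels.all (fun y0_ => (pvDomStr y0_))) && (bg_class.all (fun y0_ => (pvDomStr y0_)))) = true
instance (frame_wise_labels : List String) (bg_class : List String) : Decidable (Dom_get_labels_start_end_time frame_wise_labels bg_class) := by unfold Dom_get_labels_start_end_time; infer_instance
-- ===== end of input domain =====

-- B replaces A's stateful last_label loop by a stateless boundary-index computation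
-- (neighbour-difference comprehension, zip of consecutive boundaries, background filter);
-- objective: alternative (same cost). Return values proved equal on nonempty input.

-- ===== PORT A =====
-- Loop body of A's 'for i in range(len(frame_wise_labels))': state (labels, starts, ends, last_label),
-- element (i, frame_wise_labels[i]) via enumerate (the loop only reads frame_wise_labels[i]).
def pvBodyA (bg_class : List String) (s : List String × List Int × List Int × String)
    (p : Int × String) : List String × List Int × List Int × String :=
  if p.2 ≠ s.2.2.2 then
    ((if p.2 ∈ bg_class then s.1 else s.1 ++ [p.2]),
     (if p.2 ∈ bg_class then s.2.1 else s.2.1 ++ [p.1]),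
     (if s.2.2.2 ∈ bg_class then s.2.2.1 else s.2.2.1 ++ [p.1]),
     p.2)
  else s

def get_labels_start_end_time (frame_wise_labels : List String) (bg_class : List String) :
    List String × List Int × List Int :=
  match frame_wise_labels with
  | [] => ([], [], [])  -- frame_wise_labels[0] raises IndexError in Python; excluded by Pre_
  | f0 :: _ =>
    -- labels/starts initialised from frame_wise_labels[0], ends = [], last_label = frame_wise_labels[0]
    let init : List String × List Int × List Int × String :=
      ((if f0 ∈ bg_class then [] else [f0]),
       (if f0 ∈ bg_class then [] else [(0 : Int)]), [], f0)
    let st := (PySem.List.enumerate frame_wise_labels 0).foldl (pvBodyA bg_class) init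
    -- trailing 'ends.append(i + 1)': the loop ran (list nonempty), its last i is len-1, so i+1 = len
    (st.1, st.2.1,
     (if st.2.2.2 ∈ bg_class then st.2.2.1 else st.2.2.1 ++ [(frame_wise_labels.length : Int)]))

-- ===== PORT B =====
-- frame_wise_labels[i] at an index known to be in [0, len): exact there (hand port of in-range indexing)
def pvGetS (xs : List String) (i : Int) : String := PySem.List.pyGetD xs i ""

def get_labels_start_end_time_alt (frame_wise_labels : List String) (bg_class : List String) :
    List String × List Int × List Int :=
  let n : Int := (frame_wise_labels.length : Int)
  -- bounds = [i for i in range(n) if i == 0 or fwl[i] != fwl[i-1]] + [n]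
  let bounds := ((PySem.List.pyRange 0 n 1).filter
      (fun i => i == 0 || decide (pvGetS frame_wise_labels i ≠ pvGetS frame_wise_labels (i - 1)))) ++ [n]
  -- segs = [(fwl[s], s, e) for s, e in zip(bounds, bounds[1:]) if fwl[s] not in bg_class]
  let segs := ((bounds.zip (PySem.List.slice bounds (some 1) none)).filter
      (fun p => decide (pvGetS frame_wise_labels p.1 ∉ bg_class))).map
      (fun p => (pvGetS frame_wise_labels p.1, p.1, p.2))
  (segs.map (fun t => t.1), segs.map (fun t => t.2.1), segs.map (fun t => t.2.2))

-- ===== PRECONDITION & SPEC =====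
-- Pre_ excludes exactly the empty list, on which Python A raises IndexError (frame_wise_labels[0]).
def Pre_get_labels_start_end_time (frame_wise_labels : List String) (bg_class : List String) : Prop :=
  frame_wise_labels ≠ []
instance (frame_wise_labels : List String) (bg_class : List String) : Decidable (Pre_get_labels_start_end_time frame_wise_labels bg_class) := by unfold Pre_get_labels_start_end_time; infer_instance

def pvWitness_get_labels_start_end_time : List String × List String :=
  (["a", "a", "background", "b"], ["background", "None"])

def Spec_get_labels_start_end_time (frame_wise_labels : List String) (bg_class : List String) (out : List String × List Int × List Int) : Prop := out = get_labels_start_end_time_alt frame_wise_labels bg_class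
instance (frame_wise_labels : List String) (bg_class : List String) (out : List String × List Int × List Int) : Decidable (Spec_get_labels_start_end_time frame_wise_labels bg_class out) := by unfold Spec_get_labels_start_end_time; infer_instance

-- ===== CLAIM (what is proved, stated in full; the proofs are below) =====
def Claim_equal_get_labels_start_end_time : Prop := ∀ (frame_wise_labels : List String) (bg_class : List String), Dom_get_labels_start_end_time frame_wise_labels bg_class → Pre_get_labels_start_end_time frame_wise_labels bg_class → Spec_get_labels_start_end_time frame_wise_labels bg_class (get_labels_start_end_time frame_wise_labels bg_class)


-- ===== LEMMAS AND PROOFS =====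

-- Canonical runs of the tail: segsOf cur start i xs = the maximal runs of cur·xs, the current run
-- having begun at index start, i being the index of the head of xs; each run is (label, start, end).
def segsOf : String → Int → Int → List String → List (String × Int × Int)
  | cur, start, i, [] => [(cur, start, i)]
  | cur, start, i, x :: xs =>
    if x = cur then segsOf cur start (i+1) xs else (cur, start, i) :: segsOf x i (i+1) xs

def pvKept (bg : List String) (R : List (String × Int × Int)) : List (String × Int × Int) :=
  R.filter (fun r => decide (r.1 ∉ bg))

-- A-side: closing the fold state (appending the final end) yields the kept-runs projections.
lemma foldA_segs (bg : List String) :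
    ∀ (xs : List String) (cur : String) (start i : Int) (L : List String) (S E : List Int),
      (let st := (PySem.List.enumerate xs i).foldl (pvBodyA bg)
        (L ++ (if cur ∈ bg then [] else [cur]), S ++ (if cur ∈ bg then [] else [start]), E, cur);
       (st.1, st.2.1, st.2.2.1 ++ (if st.2.2.2 ∈ bg then [] else [i + (xs.length : Int)])))
      = (L ++ (pvKept bg (segsOf cur start i xs)).map (fun r => r.1),
         S ++ (pvKept bg (segsOf cur start i xs)).map (fun r => r.2.1),
         E ++ (pvKept bg (segsOf cur start i xs)).map (fun r => r.2.2)) := by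
  intro xs
  induction xs with
  | nil =>
    intro cur start i L S E
    by_cases h : cur ∈ bg <;>
      simp [PySem.List.enumerate_nil, segsOf, pvKept, h]
  | cons x xs ih =>
    intro cur start i L S E
    rw [PySem.List.enumerate_cons]
    simp only [List.foldl_cons]
    have hlen : i + 1 + (xs.length : Int) = i + ((x :: xs).length : Int) := by
      push_cast [List.length_cons]; ring
    by_cases h : x = cur
    · have hb : pvBodyA bg (L ++ (if cur ∈ bg then [] else [cur]),
          S ++ (if cur ∈ bg then [] else [start]), E, cur) (i, x)
          = (L ++ (if cur ∈ bg then [] else [cur]),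
             S ++ (if cur ∈ bg then [] else [start]), E, cur) := by
        simp [pvBodyA, h]
      simp only [hb]
      have this1 := ih cur start (i+1) L S E
      rw [hlen] at this1
      simp only [segsOf, if_pos h]
      exact this1
    · have hb : pvBodyA bg (L ++ (if cur ∈ bg then [] else [cur]),
          S ++ (if cur ∈ bg then [] else [start]), E, cur) (i, x)
          = ((L ++ (if cur ∈ bg then [] else [cur])) ++ (if x ∈ bg then [] else [x]),
             (S ++ (if cur ∈ bg then [] else [start])) ++ (if x ∈ bg then [] else [i]),
             E ++ (if cur ∈ bg then [] else [i]), x) := by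
        by_cases hc : cur ∈ bg <;> by_cases hx : x ∈ bg <;> simp [pvBodyA, h, hc, hx]
      simp only [hb]
      have this1 := ih x i (i+1) (L ++ (if cur ∈ bg then [] else [cur]))
        (S ++ (if cur ∈ bg then [] else [start])) (E ++ (if cur ∈ bg then [] else [i]))
      rw [hlen] at this1
      refine this1.trans ?_
      by_cases hc : cur ∈ bg <;>
        simp [segsOf, h, pvKept, hc, List.append_assoc]

-- head start of segsOf is start
lemma segs_map_start_cons : ∀ (xs : List String) (cur : String) (start i : Int),
    (segsOf cur start i xs).map (fun r => r.2.1)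
      = start :: ((segsOf cur start i xs).map (fun r => r.2.1)).tail := by
  intro xs
  induction xs with
  | nil => intro cur start i; simp [segsOf]
  | cons x xs ih =>
    intro cur start i
    by_cases h : x = cur
    · simp only [segsOf, if_pos h]; exact ih cur start (i+1)
    · simp [segsOf, h]

-- boundary chain: starts ++ [total end] = start :: ends
lemma segs_chain : ∀ (xs : List String) (cur : String) (start i : Int),
    (segsOf cur start i xs).map (fun r => r.2.1) ++ [i + (xs.length : Int)]
      = start :: (segsOf cur start i xs).map (fun r => r.2.2) := by
  intro xs
  induction xs with
  | nil => intro cur start i; simp [segsOf]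
  | cons x xs ih =>
    intro cur start i
    by_cases h : x = cur
    · simp only [segsOf, if_pos h]
      have := ih cur start (i+1)
      simpa [add_assoc, add_comm, add_left_comm] using this
    · simp only [segsOf, if_neg h, List.map_cons, List.cons_append]
      have := ih x i (i+1)
      congr 1
      simpa [add_assoc, add_comm, add_left_comm] using this

lemma pvGetS_natCast (FW : List String) (k : Nat) : pvGetS FW (k : Int) = FW.getD k "" := by
  simp [pvGetS, PySem.List.pyGetD_natCast]

lemma getD_of_drop (FW : List String) (m : Nat) (x : String) (xs : List String)
    (h : FW.drop m = x :: xs) : FW.getD m "" = x := by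
  have h0 : FW[m]? = some x := by
    have h' : (FW.drop m)[0]? = some x := by rw [h]; rfl
    rw [List.getElem?_drop] at h'; simpa using h'
  simp [List.getD_eq_getElem?_getD, h0]

lemma drop_succ_of_drop (FW : List String) (m : Nat) (x : String) (xs : List String)
    (h : FW.drop m = x :: xs) : FW.drop (m+1) = xs := by
  have : FW.drop (m+1) = (FW.drop m).drop 1 := by rw [List.drop_drop]
  rw [this, h]; rfl

-- B's neighbour-difference filter computes exactly the starts of the later runs
lemma filter_chg_eq_tail_starts (FW : List String) :
    ∀ (xs : List String) (m : Nat) (cur : String) (start : Int), 0 < m → FW.drop m = xs →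
      FW[m-1]? = some cur →
      (PySem.List.pyRange (m : Int) ((m : Int) + (xs.length : Int)) 1).filter
          (fun i => i == 0 || decide (pvGetS FW i ≠ pvGetS FW (i - 1)))
        = ((segsOf cur start (m : Int) xs).map (fun r => r.2.1)).tail := by
  intro xs
  induction xs with
  | nil =>
    intro m cur start hm hd hc
    rw [PySem.List.pyRange_one_eq_nil (by simp)]
    simp [segsOf]
  | cons x xs ih =>
    intro m cur start hm hd hc
    have hxm : FW[m]? = some x := by
      have h' : (FW.drop m)[0]? = some x := by rw [hd]; rfl
      rw [List.getElem?_drop] at h'; simpa using h'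
    have hcur : pvGetS FW ((m : Int) - 1) = cur := by
      have : ((m : Int) - 1) = ((m - 1 : Nat) : Int) := by push_cast [Nat.cast_sub hm]; ring
      rw [this, pvGetS_natCast]
      simp [List.getD_eq_getElem?_getD, hc]
    have hxg : pvGetS FW (m : Int) = x := by
      rw [pvGetS_natCast]; exact getD_of_drop FW m x xs hd
    have hne0 : (((m : Int)) == 0) = false := by simp; omega
    rw [PySem.List.pyRange_one_cons (by push_cast [List.length_cons]; omega)]
    rw [List.filter_cons]
    have hrest : (m : Int) + ((x :: xs).length : Int) = ((m + 1 : Nat) : Int) + (xs.length : Int) := by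
      push_cast [List.length_cons]; ring
    by_cases h : x = cur
    · have hp : ((m : Int) == 0 || decide (pvGetS FW (m : Int) ≠ pvGetS FW ((m : Int) - 1))) = false := by
        rw [hne0, hxg, hcur, h]; simp
      rw [hp]
      simp only [Bool.false_eq_true, if_false]
      simp only [segsOf, if_pos h]
      rw [hrest, show ((m:Int)+1) = ((m+1 : Nat) : Int) by push_cast; ring]
      exact ih (m+1) cur start (by omega) (drop_succ_of_drop FW m x xs hd)
        (by simp only [Nat.add_sub_cancel]; rw [← h]; exact hxm)
    · have hp : ((m : Int) == 0 || decide (pvGetS FW (m : Int) ≠ pvGetS FW ((m : Int) - 1))) = true := by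
        rw [hne0, hxg, hcur]; simp [h]
      rw [hp]
      simp only [if_true]
      simp only [segsOf, if_neg h, List.map_cons, List.tail_cons]
      rw [hrest, show ((m:Int)+1) = ((m+1 : Nat) : Int) by push_cast; ring]
      rw [ih (m+1) x (m : Int) (by omega) (drop_succ_of_drop FW m x xs hd)
        (by simpa using hxm)]
      exact (segs_map_start_cons xs x (m : Int) (((m+1 : Nat)) : Int)).symm

-- every run's label is the frame at its start index
lemma segs_label (FW : List String) :
    ∀ (xs : List String) (m : Nat) (cur : String) (start : Int), FW.drop m = xs →
      pvGetS FW start = cur →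
      ∀ r ∈ segsOf cur start (m : Int) xs, pvGetS FW r.2.1 = r.1 := by
  intro xs
  induction xs with
  | nil =>
    intro m cur start _ hs r hr
    simp [segsOf] at hr
    subst hr; simpa using hs
  | cons x xs ih =>
    intro m cur start hd hs r hr
    have hxg : pvGetS FW (m : Int) = x := by
      rw [pvGetS_natCast]; exact getD_of_drop FW m x xs hd
    by_cases h : x = cur
    · simp only [segsOf, if_pos h] at hr
      have := ih (m+1) cur start (drop_succ_of_drop FW m x xs hd) hs
      rw [show ((m:Int)+1) = ((m+1 : Nat) : Int) by push_cast; ring] at hr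
      exact this r hr
    · simp only [segsOf, if_neg h] at hr
      rcases List.mem_cons.mp hr with h1 | h2
      · subst h1; simpa using hs
      · have := ih (m+1) x (m : Int) (drop_succ_of_drop FW m x xs hd) hxg
        rw [show ((m:Int)+1) = ((m+1 : Nat) : Int) by push_cast; ring] at h2
        exact this r h2

lemma if_append_swap {c : Prop} {inst : Decidable c} (E : List Int) (n : Int) :
    (if c then E else E ++ [n]) = E ++ (if c then [] else [n]) := by
  split_ifs <;> simp

lemma zip_append_sentinel {α β : Type} (l₁ : List α) (l₂ : List β) (a : α)
    (h : l₁.length = l₂.length) : (l₁ ++ [a]).zip l₂ = l₁.zip l₂ := by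
  induction l₁ generalizing l₂ with
  | nil => cases l₂ with | nil => simp | cons b bs => simp at h
  | cons x xs ih =>
    cases l₂ with
    | nil => simp at h
    | cons b bs => simp_all [List.zip]

-- B on a nonempty list, in terms of the kept runs
lemma alt_eq_kept (f0 : String) (rest : List String) (bg : List String) :
    get_labels_start_end_time_alt (f0 :: rest) bg
      = ((pvKept bg (segsOf f0 0 1 rest)).map (fun r => r.1),
         (pvKept bg (segsOf f0 0 1 rest)).map (fun r => r.2.1),
         (pvKept bg (segsOf f0 0 1 rest)).map (fun r => r.2.2)) := by
  set R := segsOf f0 0 1 rest with hR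
  have hn : ((f0 :: rest).length : Int) = 1 + (rest.length : Int) := by
    push_cast [List.length_cons]; ring
  have hone : ((1 : Nat) : Int) = (1 : Int) := by norm_num
  -- starts
  have hstarts : (PySem.List.pyRange 0 ((f0 :: rest).length : Int) 1).filter
      (fun i => i == 0 || decide (pvGetS (f0 :: rest) i ≠ pvGetS (f0 :: rest) (i - 1)))
      = R.map (fun r => r.2.1) := by
    rw [PySem.List.pyRange_one_cons (by push_cast [List.length_cons]; omega)]
    rw [List.filter_cons]
    have h0 : ((0 : Int) == 0 || decide (pvGetS (f0 :: rest) 0 ≠ pvGetS (f0 :: rest) (0 - 1))) = true := by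
      simp
    rw [h0]
    simp only [if_true, zero_add]
    have := filter_chg_eq_tail_starts (f0 :: rest) rest 1 f0 0 (by omega) rfl rfl
    rw [hone] at this
    rw [show ((f0 :: rest).length : Int) = 1 + (rest.length : Int) from hn, this]
    exact (segs_map_start_cons rest f0 0 1).symm
  have hchain : R.map (fun r => r.2.1) ++ [((f0 :: rest).length : Int)]
      = 0 :: R.map (fun r => r.2.2) := by
    rw [hn]; exact segs_chain rest f0 0 1
  -- now unfold B
  show (let n : Int := ((f0 :: rest).length : Int);
    let bounds := ((PySem.List.pyRange 0 n 1).filter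
      (fun i => i == 0 || decide (pvGetS (f0 :: rest) i ≠ pvGetS (f0 :: rest) (i - 1)))) ++ [n]
    let segs := ((bounds.zip (PySem.List.slice bounds (some 1) none)).filter
      (fun p => decide (pvGetS (f0 :: rest) p.1 ∉ bg))).map
      (fun p => (pvGetS (f0 :: rest) p.1, p.1, p.2))
    (segs.map (fun t => t.1), segs.map (fun t => t.2.1), segs.map (fun t => t.2.2))) = _
  simp only [hstarts]
  rw [PySem.List.slice_from_one]
  rw [show (R.map (fun r => r.2.1) ++ [((f0 :: rest).length : Int)]).tail
      = R.map (fun r => r.2.2) by rw [hchain]; rfl]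
  rw [zip_append_sentinel _ _ _ (by simp)]
  rw [List.zip_map']
  rw [List.filter_map]
  have hcongr : R.filter ((fun p => decide (pvGetS (f0 :: rest) p.1 ∉ bg)) ∘ (fun r => (r.2.1, r.2.2)))
      = pvKept bg R := by
    apply List.filter_congr
    intro r hr
    have := segs_label (f0 :: rest) rest 1 f0 0 rfl (by simp [pvGetS, PySem.List.pyGetD_zero_cons]) r
      (by rw [hone]; exact hr)
    simp only [Function.comp]
    rw [this]
  rw [hcongr]
  have hmap : ((pvKept bg R).map (fun r => (r.2.1, r.2.2))).map
      (fun p => (pvGetS (f0 :: rest) p.1, p.1, p.2))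
      = (pvKept bg R).map (fun r => (r.1, r.2.1, r.2.2)) := by
    rw [List.map_map]
    apply List.map_congr_left
    intro r hr
    have hrR : r ∈ R := List.mem_of_mem_filter hr
    have := segs_label (f0 :: rest) rest 1 f0 0 rfl (by simp [pvGetS, PySem.List.pyGetD_zero_cons]) r
      (by rw [hone]; exact hrR)
    simp only [Function.comp]
    rw [this]
  rw [hmap]
  simp

-- ===== VERDICT (by name: the statement is the Claim_ definition above) =====
theorem get_labels_start_end_time_spec : Claim_equal_get_labels_start_end_time := by
  intro fwl bg _ hpre
  unfold Spec_get_labels_start_end_time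
  match fwl with
  | [] => exact absurd rfl hpre
  | f0 :: rest =>
    rw [alt_eq_kept]
    show (let init : List String × List Int × List Int × String :=
      ((if f0 ∈ bg then [] else [f0]),
       (if f0 ∈ bg then [] else [(0 : Int)]), [], f0)
      let st := (PySem.List.enumerate (f0 :: rest) 0).foldl (pvBodyA bg) init
      (st.1, st.2.1,
       (if st.2.2.2 ∈ bg then st.2.2.1 else st.2.2.1 ++ [((f0 :: rest).length : Int)]))) = _
    have hA := foldA_segs bg (f0 :: rest) f0 0 0 [] [] []
    simp only [List.nil_append] at hA
    have hseg : segsOf f0 0 0 (f0 :: rest) = segsOf f0 0 1 rest := by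
      simp [segsOf]
    rw [hseg] at hA
    have hend : (0 : Int) + (((f0 :: rest).length : Int)) = ((f0 :: rest).length : Int) := by ring
    rw [hend] at hA
    set st := (PySem.List.enumerate (f0 :: rest) 0).foldl (pvBodyA bg)
      ((if f0 ∈ bg then [] else [f0]), (if f0 ∈ bg then [] else [(0 : Int)]), [], f0) with hst
    simp only [if_append_swap]
    exact hA
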